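-- pv_equiv track=rewrite | github.com/Masoomeh-akbari/FCM-and-PTC-Algorithm-Enhancements | SRR-PTC.py | NegWalk_Existence
-- ===== SOURCE A (Python) =====
-- def NegWalk_Existence(A,B):
--
--     # Warshall's Algorithm for the existence of a negative directed (s,t,sigma)-walk,
--     # for all (s,t,sigma)
--     # A: matrix of positive weights
--     # B: matrix of negative weights
--     # WP: 0-1 matrix of positive walks (existence only)
--     # WN: 0-1 matrix of negative walks (existence only)
--
--
--     n=len(A)
--     WP=[[0 for i in range(n)] for i in range(n)]
--     WN=[[0 for i in range(n)] for i in range(n)]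
--
--     for s in range(n):
--         for t in range(n):
--             if A[s][t]!=0:
--                 WP[s][t]=1
--
--             if B[s][t]!=0:
--                 WN[s][t]=1
--
--     for k in range(n):
--         for i in range(2):
--              for s in range(n):
--                 for t in range(n):
--                     if (WP[s][k]==1 and WP[k][t]==1) or (WN[s][k]==1 and WN[k][t]==1):
--                          WP[s][t]=1
--
--                     if (WP[s][k]==1 and WN[k][t]==1) or (WN[s][k]==1 and WP[k][t]==1):
--                          WN[s][t]=1
--
--     return WN
-- ===== SOURCE B (Python) =====
-- def NegWalk_Existence(A, B):
--     # Per-source level-synchronous BFS on the parity-doubled graph: state (v, parity),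
--     # A-edges keep the parity, B-edges flip it; a state is marked only via a walk of
--     # length >= 1 from (s, 0), and WN[s][t] records whether (t, 1) is reachable.
--     n = len(A)
--     res = []
--     for s in range(n):
--         pos = [A[s][t] != 0 for t in range(n)]
--         neg = [B[s][t] != 0 for t in range(n)]
--         for _ in range(2 * n):
--             pos, neg = (
--                 [pos[v] or any((pos[u] and A[u][v] != 0) or (neg[u] and B[u][v] != 0)
--                                for u in range(n)) for v in range(n)],
--                 [neg[v] or any((neg[u] and A[u][v] != 0) or (pos[u] and B[u][v] != 0)
--                                for u in range(n)) for v in range(n)],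
--             )
--         res.append([1 if x else 0 for x in neg])
--     return res
-- ===== Notes on version B (the rewrite author's own statement) =====
-- stated objective: alternative
-- what changed: B replaces A's in-place doubled Warshall closure (pivoting every vertex twice over both sign matrices) by a per-source level-synchronous BFS on the parity-doubled graph with states (v, parity), where A-edges keep and B-edges flip the parity, reading off WN[s][t] as reachability of (t,1) from (s,0) by walks of length >= 1.
import Mathlib
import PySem

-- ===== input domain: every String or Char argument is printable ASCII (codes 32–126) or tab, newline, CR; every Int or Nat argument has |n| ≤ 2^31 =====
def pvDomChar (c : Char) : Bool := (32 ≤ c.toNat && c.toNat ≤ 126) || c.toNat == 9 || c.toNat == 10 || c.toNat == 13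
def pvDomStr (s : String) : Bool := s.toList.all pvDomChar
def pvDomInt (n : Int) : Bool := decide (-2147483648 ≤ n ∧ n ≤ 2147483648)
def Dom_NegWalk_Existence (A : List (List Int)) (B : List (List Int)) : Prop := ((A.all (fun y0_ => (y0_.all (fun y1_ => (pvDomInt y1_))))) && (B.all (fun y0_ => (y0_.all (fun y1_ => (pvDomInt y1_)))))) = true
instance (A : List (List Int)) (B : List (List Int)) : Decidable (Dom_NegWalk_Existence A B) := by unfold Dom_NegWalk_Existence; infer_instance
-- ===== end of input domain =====

-- B replaces A's doubled Warshall closure by a per-source level-synchronous BFS on the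
-- parity-doubled graph (objective: alternative; same return value, no mutation of the inputs).

-- shared Python-indexing helpers: m[i][j] read with default / m[i][j] = v write
def pvGet2 (m : List (List Int)) (i j : Int) : Int :=
  PySem.List.pyGetD (PySem.List.pyGetD m i []) j 0

def pvSet2 (m : List (List Int)) (i j : Int) (v : Int) : List (List Int) :=
  PySem.List.pySetD m i (PySem.List.pySetD (PySem.List.pyGetD m i []) j v)

-- m[u][v] for Nat indices (exact for the in-range indices both programs use)
def gN (m : List (List Int)) (i j : Nat) : Int := (m.getD i []).getD j 0

-- 'M[u][v] != 0' for Nat indices u, v (exact for the in-range indices Source B uses)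
def ae (M : List (List Int)) (u v : Nat) : Bool := gN M u v != 0

-- ===== PORT A =====
def NegWalk_Existence (A : List (List Int)) (B : List (List Int)) : List (List Int) :=
  let n : Int := (A.length : Int)
  let WP0 : List (List Int) := (PySem.List.pyRange 0 n 1).map (fun _ => (PySem.List.pyRange 0 n 1).map (fun _ => (0 : Int)))
  let WN0 : List (List Int) := (PySem.List.pyRange 0 n 1).map (fun _ => (PySem.List.pyRange 0 n 1).map (fun _ => (0 : Int)))
  let st1 := (PySem.List.pyRange 0 n 1).foldl (fun st s =>
    (PySem.List.pyRange 0 n 1).foldl (fun st t =>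
      let st := if pvGet2 A s t ≠ 0 then (pvSet2 st.1 s t 1, st.2) else st
      let st := if pvGet2 B s t ≠ 0 then (st.1, pvSet2 st.2 s t 1) else st
      st) st) (WP0, WN0)
  let st2 := (PySem.List.pyRange 0 n 1).foldl (fun st k =>
    (PySem.List.pyRange 0 2 1).foldl (fun st _i =>
      (PySem.List.pyRange 0 n 1).foldl (fun st s =>
        (PySem.List.pyRange 0 n 1).foldl (fun st t =>
          let st := if (pvGet2 st.1 s k = 1 ∧ pvGet2 st.1 k t = 1) ∨ (pvGet2 st.2 s k = 1 ∧ pvGet2 st.2 k t = 1)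
            then (pvSet2 st.1 s t 1, st.2) else st
          let st := if (pvGet2 st.1 s k = 1 ∧ pvGet2 st.2 k t = 1) ∨ (pvGet2 st.2 s k = 1 ∧ pvGet2 st.1 k t = 1)
            then (st.1, pvSet2 st.2 s t 1) else st
          st) st) st) st) st1
  st2.2

-- ===== PORT B =====
def NegWalk_Existence_alt (A : List (List Int)) (B : List (List Int)) : List (List Int) :=
  let n := A.length
  (List.range n).foldl (fun res s =>
    let pos := (List.range n).map (fun t => ae A s t)
    let neg := (List.range n).map (fun t => ae B s t)
    let pn := (List.range (2 * n)).foldl (fun pn _ =>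
      ((List.range n).map (fun v => pn.1.getD v false ||
          (List.range n).any (fun u => (pn.1.getD u false && ae A u v) || (pn.2.getD u false && ae B u v))),
       (List.range n).map (fun v => pn.2.getD v false ||
          (List.range n).any (fun u => (pn.2.getD u false && ae A u v) || (pn.1.getD u false && ae B u v))))) (pos, neg)
    res ++ [pn.2.map (fun x => if x then (1 : Int) else 0)]) []

-- ===== PRECONDITION & SPEC =====
-- Pre_ excludes exactly the inputs on which the Python A raises IndexError:
-- it needs n = len(A) rows in B and at least n entries in each of the first n rows of A and B.
def Pre_NegWalk_Existence (A : List (List Int)) (B : List (List Int)) : Prop :=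
  A.length ≤ B.length ∧ (∀ r ∈ A, A.length ≤ r.length) ∧ (∀ r ∈ B.take A.length, A.length ≤ r.length)
instance (A : List (List Int)) (B : List (List Int)) : Decidable (Pre_NegWalk_Existence A B) := by
  unfold Pre_NegWalk_Existence; infer_instance

def pvWitness_NegWalk_Existence : List (List Int) × List (List Int) :=
  ([[1, 0], [0, -1]], [[0, 1], [0, 0]])

def Spec_NegWalk_Existence (A : List (List Int)) (B : List (List Int)) (out : List (List Int)) : Prop := out = NegWalk_Existence_alt A B
instance (A : List (List Int)) (B : List (List Int)) (out : List (List Int)) : Decidable (Spec_NegWalk_Existence A B out) := by unfold Spec_NegWalk_Existence; infer_instance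

-- ===== CLAIM (what is proved, stated in full; the proofs are below) =====
def Claim_equal_NegWalk_Existence : Prop := ∀ (A : List (List Int)) (B : List (List Int)), Dom_NegWalk_Existence A B → Pre_NegWalk_Existence A B → Spec_NegWalk_Existence A B (NegWalk_Existence A B)

-- ===== LEMMAS AND PROOFS =====

-- Nat-indexed cell write used to restate port A's in-place updates
def setC (m : List (List Int)) (i j : Nat) (v : Int) : List (List Int) :=
  m.set i ((m.getD i []).set j v)

-- the pair of 0-1 matrices A's algorithm maintains
def StA : Type := List (List Int) × List (List Int)

def pmat (st : StA) (p : Bool) : List (List Int) := if p then st.2 else st.1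

-- A-side loop bodies restated with Nat indices
def cellInit (A B : List (List Int)) (st : StA) (s t : Nat) : StA :=
  let st := if gN A s t ≠ 0 then (setC st.1 s t 1, st.2) else st
  if gN B s t ≠ 0 then (st.1, setC st.2 s t 1) else st

-- conditional in-place write m[s][t] = 1
def cw (c : Prop) [Decidable c] (m : List (List Int)) (s t : Nat) : List (List Int) :=
  if c then setC m s t 1 else m

def cellPiv (k : Nat) (st : StA) (s t : Nat) : StA :=
  let m1 := cw ((gN st.1 s k = 1 ∧ gN st.1 k t = 1) ∨ (gN st.2 s k = 1 ∧ gN st.2 k t = 1)) st.1 s t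
  let m2 := cw ((gN m1 s k = 1 ∧ gN st.2 k t = 1) ∨ (gN st.2 s k = 1 ∧ gN m1 k t = 1)) st.2 s t
  (m1, m2)

def passP (n k : Nat) (st : StA) : StA :=
  (List.range n).foldl (fun st s => (List.range n).foldl (fun st t => cellPiv k st s t) st) st

def zeroM (n : Nat) : List (List Int) := (List.range n).map (fun _ => (List.range n).map (fun _ => (0 : Int)))

def initA (A B : List (List Int)) (n : Nat) : StA :=
  (List.range n).foldl (fun st s => (List.range n).foldl (fun st t => cellInit A B st s t) st) (zeroM n, zeroM n)

def runA (A B : List (List Int)) (n : Nat) : StA :=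
  (List.range n).foldl (fun st k => (PySem.List.pyRange 0 2 1).foldl (fun st _ => passP n k st) st)
    (initA A B n)

theorem pvGet2_natCast (m : List (List Int)) (i j : Nat) :
    pvGet2 m (i : Int) (j : Int) = gN m i j := by
  simp [pvGet2, gN, PySem.List.pyGetD_natCast]

theorem pvSet2_natCast (m : List (List Int)) (i j : Nat) (v : Int) :
    pvSet2 m (i : Int) (j : Int) v = setC m i j v := by
  simp [pvSet2, setC, PySem.List.pySetD_natCast, PySem.List.pyGetD_natCast]

theorem pyRange_two : PySem.List.pyRange 0 2 1 = [0, 1] := by decide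

theorem portA_eq (A B : List (List Int)) : NegWalk_Existence A B = (runA A B A.length).2 := by
  simp only [NegWalk_Existence, runA, initA, passP, zeroM, cellInit,
    PySem.List.pyRange_zero_natCast, List.foldl_map, List.map_map, Function.comp_def,
    pvGet2_natCast, pvSet2_natCast]
  congr 1
  apply PySem.List.foldl_congr_mem
  intro st k _
  apply PySem.List.foldl_congr_mem
  intro st _ _
  apply PySem.List.foldl_congr_mem
  intro st s _
  apply PySem.List.foldl_congr_mem
  intro st t _
  simp only [cellPiv, cw]
  split_ifs <;> rfl

-- walks of length ≥ 1 in the parity-doubled graph, all intermediate vertices < k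
inductive Wk (A B : List (List Int)) (k : Nat) : Nat → Nat → Bool → Prop
  | sa {u v : Nat} : ae A u v = true → Wk A B k u v false
  | sb {u v : Nat} : ae B u v = true → Wk A B k u v true
  | ca {u m v : Nat} {q : Bool} : ae A u m = true → m < k → Wk A B k m v q → Wk A B k u v q
  | cb {u m v : Nat} {q : Bool} : ae B u m = true → m < k → Wk A B k m v q → Wk A B k u v (!q)

theorem Wk_mono {A B : List (List Int)} {k k' : Nat} (h : k ≤ k') {u v : Nat} {q : Bool}
    (w : Wk A B k u v q) : Wk A B k' u v q := by
  induction w with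
  | sa h1 => exact Wk.sa h1
  | sb h1 => exact Wk.sb h1
  | ca h1 hm _ ih => exact Wk.ca h1 (lt_of_lt_of_le hm h) ih
  | cb h1 hm _ ih => exact Wk.cb h1 (lt_of_lt_of_le hm h) ih

theorem Wk_trans {A B : List (List Int)} {k : Nat} {u m v : Nat} {p q : Bool}
    (h1 : Wk A B k u m p) (hm : m < k) (h2 : Wk A B k m v q) : Wk A B k u v (p ^^ q) := by
  induction h1 with
  | sa h => simpa using Wk.ca h hm h2
  | sb h => simpa using Wk.cb h hm h2
  | ca h hm' _ ih => exact Wk.ca h hm' (ih hm h2)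
  | cb h hm' _ ih => simpa using Wk.cb h hm' (ih hm h2)

-- parities realizable by concatenations of (k→k)-cycles avoiding k internally: boolean xor
-- closes within two factors
def Kst (A B : List (List Int)) (k : Nat) (c : Bool) : Prop :=
  c = false ∨ Wk A B k k k c ∨ ∃ c1 c2, Wk A B k k k c1 ∧ Wk A B k k k c2 ∧ c = (c1 ^^ c2)

theorem Kst_cons {A B : List (List Int)} {k : Nat} {d c : Bool}
    (hd : Wk A B k k k d) (hc : Kst A B k c) : Kst A B k (d ^^ c) := by
  rcases hc with rfl | hc | ⟨c1, c2, hc1, hc2, rfl⟩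
  · exact Or.inr (Or.inl (by simpa using hd))
  · exact Or.inr (Or.inr ⟨d, c, hd, hc, rfl⟩)
  · -- among the three available cycle parities d, c1, c2 two are equal and cancel
    cases d <;> cases c1 <;> cases c2 <;> simp_all <;>
      first
        | exact Or.inl rfl
        | exact Or.inr (Or.inl hd)
        | exact Or.inr (Or.inl hc1)
        | exact Or.inr (Or.inl hc2)

theorem Wk_decomp {A B : List (List Int)} {k : Nat} {u v : Nat} {q : Bool}
    (w : Wk A B (k+1) u v q) :
    Wk A B k u v q ∨ ∃ p1 c p2, Wk A B k u k p1 ∧ Kst A B k c ∧ Wk A B k k v p2 ∧ q = (p1 ^^ (c ^^ p2)) := by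
  induction w with
  | sa h => exact Or.inl (Wk.sa h)
  | sb h => exact Or.inl (Wk.sb h)
  | @ca u m _ q h hm _ ih =>
      rcases Nat.lt_succ_iff_lt_or_eq.mp hm with hm' | rfl
      · rcases ih with hw | ⟨p1, c, p2, h1, hc, h2, rfl⟩
        · exact Or.inl (Wk.ca h hm' hw)
        · exact Or.inr ⟨p1, c, p2, Wk.ca h hm' h1, hc, h2, rfl⟩
      · rcases ih with hw | ⟨p1, c, p2, h1, hc, h2, rfl⟩
        · exact Or.inr ⟨false, false, q, Wk.sa h, Or.inl rfl, hw, by simp⟩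
        · exact Or.inr ⟨false, p1 ^^ c, p2, Wk.sa h, Kst_cons h1 hc, h2, by
            cases p1 <;> cases c <;> cases p2 <;> rfl⟩
  | @cb u m _ q h hm _ ih =>
      rcases Nat.lt_succ_iff_lt_or_eq.mp hm with hm' | rfl
      · rcases ih with hw | ⟨p1, c, p2, h1, hc, h2, rfl⟩
        · exact Or.inl (Wk.cb h hm' hw)
        · exact Or.inr ⟨!p1, c, p2, Wk.cb h hm' h1, hc, h2, by
            cases p1 <;> cases c <;> cases p2 <;> rfl⟩
      · rcases ih with hw | ⟨p1, c, p2, h1, hc, h2, rfl⟩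
        · exact Or.inr ⟨true, false, q, Wk.sb h, Or.inl rfl, hw, by simp⟩
        · exact Or.inr ⟨true, p1 ^^ c, p2, Wk.sb h, Kst_cons h1 hc, h2, by
            cases p1 <;> cases c <;> cases p2 <;> rfl⟩

-- generic fold lemmas: predicate preservation, chained growth, and hitting one element
theorem foldl_pred {α γ : Type} (P : α → Prop) (f : α → γ → α) (l : List γ)
    (h : ∀ a x, x ∈ l → P a → P (f a x)) : ∀ a, P a → P (l.foldl f a) := by
  induction l with
  | nil => intro a ha; exact ha
  | cons x xs ih =>
      intro a ha
      exact ih (fun a y hy => h a y (List.mem_cons_of_mem _ hy)) _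
        (h a x List.mem_cons_self ha)

theorem foldl_chain {α γ : Type} (le : α → α → Prop) (hrefl : ∀ a, le a a)
    (htrans : ∀ {a b c}, le a b → le b c → le a c) (f : α → γ → α) (l : List γ)
    (hmono : ∀ a x, x ∈ l → le a (f a x)) : ∀ a, le a (l.foldl f a) := by
  induction l with
  | nil => intro a; exact hrefl a
  | cons x xs ih =>
      intro a
      exact htrans (hmono a x List.mem_cons_self)
        (ih (fun a y hy => hmono a y (List.mem_cons_of_mem _ hy)) (f a x))

theorem foldl_point {α γ : Type} (P : α → Prop) (le : α → α → Prop) (hrefl : ∀ a, le a a)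
    (htrans : ∀ {a b c}, le a b → le b c → le a c) (f : α → γ → α) (l : List γ)
    (hP : ∀ a x, x ∈ l → P a → P (f a x)) (hmono : ∀ a x, x ∈ l → le a (f a x))
    (Q : α → Prop) (hQ : ∀ a a', le a a' → Q a → Q a') (x : γ) (hx : x ∈ l)
    (a0 : α) (hP0 : P a0) (hkey : ∀ a, P a → le a0 a → Q (f a x)) : Q (l.foldl f a0) := by
  obtain ⟨l1, l2, rfl⟩ := List.append_of_mem hx
  rw [List.foldl_append, List.foldl_cons]
  have hm1 : ∀ y ∈ l1, y ∈ l1 ++ x :: l2 := fun y hy => List.mem_append_left _ hy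
  have hm2 : ∀ y ∈ l2, y ∈ l1 ++ x :: l2 := fun y hy =>
    List.mem_append_right _ (List.mem_cons_of_mem _ hy)
  have hP1 : P (l1.foldl f a0) :=
    foldl_pred P f l1 (fun a y hy => hP a y (hm1 y hy)) a0 hP0
  have hle1 : le a0 (l1.foldl f a0) :=
    foldl_chain le hrefl htrans f l1 (fun a y hy => hmono a y (hm1 y hy)) a0
  have hQx : Q (f (l1.foldl f a0) x) := hkey _ hP1 hle1
  have : (fun a => Q a) (l2.foldl f (f (l1.foldl f a0) x)) := by
    refine foldl_pred (fun a => Q a) f l2 ?_ _ hQx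
    intro a y hy hQa
    exact hQ a (f a y) (hmono a y (hm2 y hy)) hQa
  exact this

-- structural facts about gN / setC
def Shape (n : Nat) (m : List (List Int)) : Prop := m.length = n ∧ ∀ r ∈ m, r.length = n

def ZeroOne (m : List (List Int)) : Prop := ∀ i j, gN m i j = 0 ∨ gN m i j = 1

theorem gN_setC_or (m : List (List Int)) (S T i j : Nat) (v : Int) :
    gN (setC m S T v) i j = gN m i j ∨ gN (setC m S T v) i j = v := by
  unfold setC gN
  by_cases hiS : i = S
  · subst hiS
    by_cases hi : i < m.length
    · have hrow : m.getD i [] = m[i] := List.getD_eq_getElem m [] hi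
      have h2 : (m.set i ((m.getD i []).set T v)).getD i [] = m[i].set T v := by
        rw [hrow, List.getD_eq_getElem?_getD, List.getElem?_set_self (by simpa using hi)]
        rfl
      rw [h2, hrow]
      by_cases hjT : j = T
      · subst hjT
        by_cases hT : j < m[i].length
        · right
          rw [List.getD_eq_getElem?_getD, List.getElem?_set_self (by simpa using hT)]
          rfl
        · left
          rw [List.set_eq_of_length_le (Nat.le_of_not_lt hT)]
      · left
        simp only [List.getD_eq_getElem?_getD]
        rw [List.getElem?_set_ne (fun h => hjT h.symm)]
    · left
      rw [List.set_eq_of_length_le (Nat.le_of_not_lt hi)]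
  · left
    simp only [List.getD_eq_getElem?_getD]
    rw [List.getElem?_set_ne (fun h => hiS h.symm)]

theorem gN_setC (n : Nat) (m : List (List Int)) (hS : Shape n m) (i j S T : Nat)
    (hi : S < n) (hT : T < n) (v : Int) :
    gN (setC m S T v) i j = if i = S ∧ j = T then v else gN m i j := by
  obtain ⟨hlen, hrows⟩ := hS
  unfold setC gN
  by_cases hiS : i = S
  · subst hiS
    have hi' : i < m.length := by omega
    have hrow : m.getD i [] = m[i] := List.getD_eq_getElem m [] hi'
    have hTl : T < m[i].length := by rw [hrows m[i] (List.getElem_mem hi')]; exact hT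
    have h2 : (m.set i ((m.getD i []).set T v)).getD i [] = m[i].set T v := by
      rw [hrow, List.getD_eq_getElem?_getD, List.getElem?_set_self (by simpa using hi')]
      rfl
    rw [h2, hrow]
    by_cases hjT : j = T
    · subst hjT
      rw [if_pos ⟨rfl, rfl⟩, List.getD_eq_getElem?_getD,
        List.getElem?_set_self (by simpa using hTl)]
      rfl
    · rw [if_neg (by simp [hjT])]
      simp only [List.getD_eq_getElem?_getD]
      rw [List.getElem?_set_ne (fun h => hjT h.symm)]
  · rw [if_neg (by simp [hiS])]
    simp only [List.getD_eq_getElem?_getD]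
    rw [List.getElem?_set_ne (fun h => hiS h.symm)]

theorem shape_setC (n : Nat) (m : List (List Int)) (hS : Shape n m) (S T : Nat) (v : Int) :
    Shape n (setC m S T v) := by
  obtain ⟨hlen, hrows⟩ := hS
  unfold setC
  by_cases hi : S < m.length
  · refine ⟨by simpa using hlen, ?_⟩
    intro r hr
    rcases List.mem_or_eq_of_mem_set hr with h | h
    · exact hrows r h
    · subst h
      rw [List.getD_eq_getElem m [] hi]
      simpa using hrows m[S] (List.getElem_mem hi)
  · rw [List.set_eq_of_length_le (Nat.le_of_not_lt hi)]
    exact ⟨hlen, hrows⟩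

-- the partial order "every 1-entry is kept" on A's state pairs
def leA (st st' : StA) : Prop :=
  (∀ s t, gN st.1 s t = 1 → gN st'.1 s t = 1) ∧ (∀ s t, gN st.2 s t = 1 → gN st'.2 s t = 1)

theorem leA_refl (st : StA) : leA st st := ⟨fun _ _ h => h, fun _ _ h => h⟩

theorem leA_trans {a b c : StA} (h1 : leA a b) (h2 : leA b c) : leA a c :=
  ⟨fun s t h => h2.1 s t (h1.1 s t h), fun s t h => h2.2 s t (h1.2 s t h)⟩

theorem setC_mono_one (m : List (List Int)) (S T i j : Nat) (h : gN m i j = 1) :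
    gN (setC m S T 1) i j = 1 := by
  rcases gN_setC_or m S T i j 1 with h' | h' <;> rw [h'] <;> try exact h

-- A-side invariants
def PSa (n : Nat) (st : StA) : Prop :=
  Shape n st.1 ∧ Shape n st.2 ∧ ZeroOne st.1 ∧ ZeroOne st.2

def SoundA (A B : List (List Int)) (n k : Nat) (st : StA) : Prop :=
  ∀ s t, s < n → t < n →
    (gN st.1 s t = 1 → Wk A B k s t false) ∧ (gN st.2 s t = 1 → Wk A B k s t true)

def InvA (A B : List (List Int)) (n k : Nat) (st : StA) : Prop :=
  PSa n st ∧ ∀ s t, s < n → t < n →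
    (gN st.1 s t = 1 ↔ Wk A B k s t false) ∧ (gN st.2 s t = 1 ↔ Wk A B k s t true)

theorem InvA_pmat {A B : List (List Int)} {n k : Nat} {st : StA} (h : InvA A B n k st)
    {s t : Nat} (hs : s < n) (ht : t < n) (p : Bool) :
    gN (pmat st p) s t = 1 ↔ Wk A B k s t p := by
  cases p
  · exact (h.2 s t hs ht).1
  · exact (h.2 s t hs ht).2

theorem cw_mono (c : Prop) [Decidable c] (m : List (List Int)) (s t i j : Nat)
    (h : gN m i j = 1) : gN (cw c m s t) i j = 1 := by
  unfold cw; split_ifs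
  · exact setC_mono_one m s t i j h
  · exact h

theorem cw_shape {n : Nat} (c : Prop) [Decidable c] {m : List (List Int)} (hS : Shape n m)
    (s t : Nat) : Shape n (cw c m s t) := by
  unfold cw; split_ifs
  · exact shape_setC n m hS s t 1
  · exact hS

theorem cw_zeroone (c : Prop) [Decidable c] {m : List (List Int)} (hz : ZeroOne m)
    (s t : Nat) : ZeroOne (cw c m s t) := by
  unfold cw; split_ifs
  · intro i j
    rcases gN_setC_or m s t i j 1 with h | h <;> rw [h]
    · exact hz i j
    · exact Or.inr rfl
  · exact hz

theorem gN_cw_iff {n : Nat} (c : Prop) [Decidable c] {m : List (List Int)} (hS : Shape n m)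
    {s t : Nat} (hs : s < n) (ht : t < n) (i j : Nat) :
    gN (cw c m s t) i j = 1 ↔ gN m i j = 1 ∨ (c ∧ i = s ∧ j = t) := by
  unfold cw; split_ifs with hc
  · rw [gN_setC n m hS i j s t hs ht 1]
    by_cases hij : i = s ∧ j = t
    · rw [if_pos hij]; simp [hij, hc]
    · rw [if_neg hij]; simp [hij, hc]
  · simp [hc]

theorem cellPiv_mono (k : Nat) (st : StA) (s t : Nat) : leA st (cellPiv k st s t) := by
  refine ⟨fun s' t' h => cw_mono _ st.1 s t s' t' h, fun s' t' h => cw_mono _ st.2 s t s' t' h⟩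

theorem cellPiv_PSa {n k : Nat} {st : StA} (hPS : PSa n st)
    (s t : Nat) : PSa n (cellPiv k st s t) := by
  obtain ⟨h1, h2, z1, z2⟩ := hPS
  exact ⟨cw_shape _ h1 s t, cw_shape _ h2 s t, cw_zeroone _ z1 s t, cw_zeroone _ z2 s t⟩

theorem cellPiv_sound {A B : List (List Int)} {n k : Nat} {st : StA}
    (hPS : PSa n st) (hSnd : SoundA A B n (k+1) st) (hk : k < n)
    {s t : Nat} (hs : s < n) (ht : t < n) : SoundA A B n (k+1) (cellPiv k st s t) := by
  have hkk : k < k + 1 := Nat.lt_succ_self k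
  obtain ⟨hS1, hS2, _, _⟩ := hPS
  -- the first component after the update, and its soundness
  have snd1 : ∀ s' t', s' < n → t' < n → gN (cellPiv k st s t).1 s' t' = 1 →
      Wk A B (k+1) s' t' false := by
    intro s' t' hs' ht' hval
    simp only [cellPiv] at hval
    rw [gN_cw_iff _ hS1 hs ht] at hval
    rcases hval with h | ⟨hc, rfl, rfl⟩
    · exact (hSnd s' t' hs' ht').1 h
    · rcases hc with ⟨ha, hb⟩ | ⟨ha, hb⟩
      · simpa using Wk_trans ((hSnd s' k hs' hk).1 ha) hkk ((hSnd k t' hk ht').1 hb)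
      · simpa using Wk_trans ((hSnd s' k hs' hk).2 ha) hkk ((hSnd k t' hk ht').2 hb)
  intro s' t' hs' ht'
  refine ⟨snd1 s' t' hs' ht', ?_⟩
  intro hval
  simp only [cellPiv] at hval
  rw [gN_cw_iff _ hS2 hs ht] at hval
  rcases hval with h | ⟨hc, rfl, rfl⟩
  · exact (hSnd s' t' hs' ht').2 h
  · rcases hc with ⟨ha, hb⟩ | ⟨ha, hb⟩
    · simpa using Wk_trans (snd1 s' k hs' hk ha) hkk ((hSnd k t' hk ht').2 hb)
    · simpa using Wk_trans ((hSnd s' k hs' hk).2 ha) hkk (snd1 k t' hk ht' hb)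

-- one pivot pass dominates a "static" relaxation from any earlier state
def condA (st : StA) (k s t : Nat) (q : Bool) : Prop :=
  ∃ p1 p2, q = (p1 ^^ p2) ∧ gN (pmat st p1) s k = 1 ∧ gN (pmat st p2) k t = 1

theorem leA_pmat {st st' : StA} (h : leA st st') (p : Bool) {s t : Nat}
    (hv : gN (pmat st p) s t = 1) : gN (pmat st' p) s t = 1 := by
  cases p
  · exact h.1 s t hv
  · exact h.2 s t hv

theorem cellPiv_target {n : Nat} {st0 st : StA} {k s t : Nat}
    (hk : k < n) (hs : s < n) (ht : t < n)
    (hPS : PSa n st) (hle : leA st0 st) {q : Bool} (hcond : condA st0 k s t q) :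
    gN (pmat (cellPiv k st s t) q) s t = 1 := by
  obtain ⟨hS1, hS2, _, _⟩ := hPS
  obtain ⟨p1, p2, rfl, h1, h2⟩ := hcond
  have h1' := leA_pmat hle p1 h1
  have h2' := leA_pmat hle p2 h2
  have hmono1 : ∀ p i j, gN (pmat st p) i j = 1 → gN (pmat (cellPiv k st s t) p) i j = 1 :=
    fun p i j h => leA_pmat (cellPiv_mono k st s t) p h
  cases p1 <;> cases p2
  · -- positive ∘ positive: the first write fires
    show gN (cellPiv k st s t).1 s t = 1
    simp only [cellPiv]
    rw [gN_cw_iff _ hS1 hs ht]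
    exact Or.inr ⟨Or.inl ⟨h1', h2'⟩, rfl, rfl⟩
  · -- positive ∘ negative: the second write fires (reads the updated first component)
    show gN (cellPiv k st s t).2 s t = 1
    simp only [cellPiv]
    rw [gN_cw_iff _ hS2 hs ht]
    exact Or.inr ⟨Or.inl ⟨cw_mono _ st.1 s t s k h1', h2'⟩, rfl, rfl⟩
  · show gN (cellPiv k st s t).2 s t = 1
    simp only [cellPiv]
    rw [gN_cw_iff _ hS2 hs ht]
    exact Or.inr ⟨Or.inr ⟨h1', cw_mono _ st.1 s t k t h2'⟩, rfl, rfl⟩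
  · show gN (cellPiv k st s t).1 s t = 1
    simp only [cellPiv]
    rw [gN_cw_iff _ hS1 hs ht]
    exact Or.inr ⟨Or.inr ⟨h1', h2'⟩, rfl, rfl⟩

theorem passP_mono (n k : Nat) (st : StA) : leA st (passP n k st) := by
  refine foldl_chain leA leA_refl leA_trans _ _ (fun a s _ => ?_) st
  exact foldl_chain leA leA_refl leA_trans _ _ (fun a t _ => cellPiv_mono k a s t) a

theorem passP_sound {A B : List (List Int)} {n k : Nat} {st : StA}
    (hk : k < n) (h : PSa n st ∧ SoundA A B n (k+1) st) :
    PSa n (passP n k st) ∧ SoundA A B n (k+1) (passP n k st) := by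
  refine foldl_pred (fun a => PSa n a ∧ SoundA A B n (k+1) a) _ _ (fun a s hsm ha => ?_) st h
  have hs := List.mem_range.mp hsm
  refine foldl_pred (fun a => PSa n a ∧ SoundA A B n (k+1) a) _ _ (fun a t htm ha' => ?_) a ha
  have ht := List.mem_range.mp htm
  exact ⟨cellPiv_PSa ha'.1 s t, cellPiv_sound ha'.1 ha'.2 hk hs ht⟩

theorem passP_target {n k s t : Nat} (hk : k < n) (hs : s < n) (ht : t < n)
    {st0 : StA} (hPS0 : PSa n st0) {q : Bool} (hcond : condA st0 k s t q) :
    gN (pmat (passP n k st0) q) s t = 1 := by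
  refine foldl_point (PSa n) leA leA_refl leA_trans _ _
    (fun a s' _ ha => foldl_pred (PSa n) _ _ (fun a' t' _ ha' => cellPiv_PSa ha' s' t') a ha)
    (fun a s' _ => foldl_chain leA leA_refl leA_trans _ _ (fun a' t' _ => cellPiv_mono k a' s' t') a)
    (fun a => gN (pmat a q) s t = 1) (fun a a' hle h => leA_pmat hle q h)
    s (List.mem_range.mpr hs) st0 hPS0 ?_
  intro a hPa hlea
  refine foldl_point (PSa n) leA leA_refl leA_trans _ _
    (fun a' t' _ ha' => cellPiv_PSa ha' s t')
    (fun a' t' _ => cellPiv_mono k a' s t')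
    (fun a' => gN (pmat a' q) s t = 1) (fun a' a'' hle h => leA_pmat hle q h)
    t (List.mem_range.mpr ht) a hPa ?_
  intro a' hPa' hlea'
  exact cellPiv_target hk hs ht hPa' (leA_trans hlea hlea') hcond
-- completeness of the double pass: together with the decomposition it reaches Wk (k+1)
theorem pivot_step {A B : List (List Int)} {n k : Nat} (hk : k < n) {st : StA}
    (hInv : InvA A B n k st) : InvA A B n (k+1) (passP n k (passP n k st)) := by
  obtain ⟨hPS, hIff⟩ := hInv
  have hSnd : SoundA A B n (k+1) st := fun s t hs ht =>
    ⟨fun h => Wk_mono (Nat.le_succ k) ((hIff s t hs ht).1.mp h),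
     fun h => Wk_mono (Nat.le_succ k) ((hIff s t hs ht).2.mp h)⟩
  have h1 := passP_sound hk ⟨hPS, hSnd⟩
  have h2 := passP_sound hk h1
  have hle1 : leA st (passP n k st) := passP_mono n k st
  have hle2 : leA (passP n k st) (passP n k (passP n k st)) := passP_mono n k _
  refine ⟨h2.1, fun s t hs ht => ?_⟩
  have complete : ∀ q, Wk A B (k+1) s t q →
      gN (pmat (passP n k (passP n k st)) q) s t = 1 := by
    intro q w
    rcases Wk_decomp w with hw | ⟨p1, c, p2, hp1, hc, hp2, rfl⟩
    · -- a walk avoiding k survives from the pre-pass state by monotonicity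
      exact leA_pmat (leA_trans hle1 hle2) q
        ((InvA_pmat ⟨hPS, hIff⟩ hs ht q).mpr hw)
    · have g1 : gN (pmat st p1) s k = 1 := (InvA_pmat ⟨hPS, hIff⟩ hs hk p1).mpr hp1
      have g2 : gN (pmat st p2) k t = 1 := (InvA_pmat ⟨hPS, hIff⟩ hk ht p2).mpr hp2
      rcases hc with rfl | hcyc | ⟨c1, c2, hc1, hc2, rfl⟩
      · -- no cycle at k: one relaxation in the second pass suffices
        refine passP_target hk hs ht h1.1 ⟨p1, p2, by simp, ?_, ?_⟩
        · exact leA_pmat hle1 p1 g1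
        · exact leA_pmat hle1 p2 g2
      · -- one cycle at k, absorbed into (s,k) during the first pass
        have gc : gN (pmat st c) k k = 1 := (InvA_pmat ⟨hPS, hIff⟩ hk hk c).mpr hcyc
        have m1 : gN (pmat (passP n k st) (p1 ^^ c)) s k = 1 :=
          passP_target hk hs hk hPS ⟨p1, c, rfl, g1, gc⟩
        refine passP_target hk hs ht h1.1 ⟨p1 ^^ c, p2, ?_, m1, leA_pmat hle1 p2 g2⟩
        cases p1 <;> cases c <;> cases p2 <;> rfl
      · -- two cycles at k, one absorbed into (s,k), the other into (k,t)
        have gc1 : gN (pmat st c1) k k = 1 := (InvA_pmat ⟨hPS, hIff⟩ hk hk c1).mpr hc1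
        have gc2 : gN (pmat st c2) k k = 1 := (InvA_pmat ⟨hPS, hIff⟩ hk hk c2).mpr hc2
        have m1 : gN (pmat (passP n k st) (p1 ^^ c1)) s k = 1 :=
          passP_target hk hs hk hPS ⟨p1, c1, rfl, g1, gc1⟩
        have m2 : gN (pmat (passP n k st) (c2 ^^ p2)) k t = 1 :=
          passP_target hk hk ht hPS ⟨c2, p2, rfl, gc2, g2⟩
        refine passP_target hk hs ht h1.1 ⟨p1 ^^ c1, c2 ^^ p2, ?_, m1, m2⟩
        cases p1 <;> cases c1 <;> cases c2 <;> cases p2 <;> rfl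
  constructor
  · exact ⟨fun h => (h2.2 s t hs ht).1 h, complete false⟩
  · exact ⟨fun h => (h2.2 s t hs ht).2 h, complete true⟩

-- characterization of walks with no intermediate vertices: single edges
theorem Wk_zero {A B : List (List Int)} {s t : Nat} {q : Bool} :
    Wk A B 0 s t q ↔ ((q = false ∧ ae A s t = true) ∨ (q = true ∧ ae B s t = true)) := by
  constructor
  · intro w
    cases w with
    | sa h => exact Or.inl ⟨rfl, h⟩
    | sb h => exact Or.inr ⟨rfl, h⟩
    | ca _ hm _ => exact absurd hm (Nat.not_lt_zero _)
    | cb _ hm _ => exact absurd hm (Nat.not_lt_zero _)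
  · rintro (⟨rfl, h⟩ | ⟨rfl, h⟩)
    · exact Wk.sa h
    · exact Wk.sb h

theorem gN_zeroM (n i j : Nat) : gN (zeroM n) i j = 0 := by
  unfold gN zeroM
  simp only [List.getD_eq_getElem?_getD]
  rcases h : ((List.range n).map (fun _ => (List.range n).map (fun _ => (0 : Int))))[i]? with _ | row
  · simp
  · have hrow := List.mem_of_getElem? h
    obtain ⟨x, _, rfl⟩ := List.mem_map.mp hrow
    simp only [Option.getD_some, List.getD_eq_getElem?_getD]
    rcases h2 : ((List.range n).map (fun _ => (0 : Int)))[j]? with _ | v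
    · simp
    · have hv := List.mem_of_getElem? h2
      obtain ⟨y, _, rfl⟩ := List.mem_map.mp hv
      simp

theorem shape_zeroM (n : Nat) : Shape n (zeroM n) := by
  refine ⟨by simp [zeroM], ?_⟩
  intro r hr
  obtain ⟨x, _, rfl⟩ := List.mem_map.mp hr
  simp

-- the initialization double loop writes exactly the edge indicators
theorem initA_char (A B : List (List Int)) (n : Nat) :
    PSa n (initA A B n) ∧ (∀ s t, s < n → t < n →
      (gN (initA A B n).1 s t = 1 ↔ ae A s t = true) ∧
      (gN (initA A B n).2 s t = 1 ↔ ae B s t = true)) := by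
  have hz : PSa n (zeroM n, zeroM n) :=
    ⟨shape_zeroM n, shape_zeroM n,
     fun i j => Or.inl (gN_zeroM n i j), fun i j => Or.inl (gN_zeroM n i j)⟩
  -- rewrite cellInit as two conditional writes
  have hcell : ∀ st s t, cellInit A B st s t =
      (cw (gN A s t ≠ 0) st.1 s t, cw (gN B s t ≠ 0) st.2 s t) := by
    intro st s t
    unfold cellInit cw
    split_ifs <;> rfl
  have hmono : ∀ st s t, leA st (cellInit A B st s t) := by
    intro st s t
    rw [hcell]
    exact ⟨fun s' t' h => cw_mono _ st.1 s t s' t' h, fun s' t' h => cw_mono _ st.2 s t s' t' h⟩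
  have hPSc : ∀ (st : StA) s t, PSa n st → PSa n (cellInit A B st s t) := by
    intro st s t h
    rw [hcell]
    exact ⟨cw_shape _ h.1 s t, cw_shape _ h.2.1 s t,
      cw_zeroone _ h.2.2.1 s t, cw_zeroone _ h.2.2.2 s t⟩
  -- soundness: every 1-entry is an edge
  have hsound : PSa n (initA A B n) ∧ (∀ s t, s < n → t < n →
      (gN (initA A B n).1 s t = 1 → ae A s t = true) ∧
      (gN (initA A B n).2 s t = 1 → ae B s t = true)) := by
    refine foldl_pred (fun a : StA => PSa n a ∧ (∀ s t, s < n → t < n →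
        (gN a.1 s t = 1 → ae A s t = true) ∧ (gN a.2 s t = 1 → ae B s t = true)))
      _ _ (fun a s hsm ha => ?_) _ ⟨hz, fun s t _ _ =>
      ⟨fun h => absurd (gN_zeroM n s t) (by rw [h]; norm_num),
       fun h => absurd (gN_zeroM n s t) (by rw [h]; norm_num)⟩⟩
    have hs := List.mem_range.mp hsm
    refine foldl_pred (fun a : StA => PSa n a ∧ (∀ s t, s < n → t < n →
        (gN a.1 s t = 1 → ae A s t = true) ∧ (gN a.2 s t = 1 → ae B s t = true)))
      _ _ (fun a t htm ha' => ?_) _ ha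
    have ht := List.mem_range.mp htm
    obtain ⟨haPS, haE⟩ := ha'
    refine ⟨hPSc a s t haPS, fun s' t' hs' ht' => ?_⟩
    rw [hcell]
    constructor <;> intro hv
    · rw [gN_cw_iff _ haPS.1 hs ht] at hv
      rcases hv with h | ⟨hc, rfl, rfl⟩
      · exact (haE s' t' hs' ht').1 h
      · simpa [ae] using hc
    · rw [gN_cw_iff _ haPS.2.1 hs ht] at hv
      rcases hv with h | ⟨hc, rfl, rfl⟩
      · exact (haE s' t' hs' ht').2 h
      · simpa [ae] using hc
  refine ⟨hsound.1, fun s t hs ht => ⟨⟨fun h => (hsound.2 s t hs ht).1 h, ?_⟩,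
    ⟨fun h => (hsound.2 s t hs ht).2 h, ?_⟩⟩⟩
  · -- completeness for the positive matrix
    intro hA
    refine foldl_point (PSa n) leA leA_refl leA_trans _ _
      (fun a s' _ ha => foldl_pred (PSa n) _ _ (fun a' t' _ ha' => hPSc a' s' t' ha') a ha)
      (fun a s' _ => foldl_chain leA leA_refl leA_trans _ _ (fun a' t' _ => hmono a' s' t') a)
      (fun a => gN a.1 s t = 1) (fun a a' hle h => hle.1 s t h)
      s (List.mem_range.mpr hs) _ hz ?_
    intro a hPa _
    refine foldl_point (PSa n) leA leA_refl leA_trans _ _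
      (fun a' t' _ ha' => hPSc a' s t' ha') (fun a' t' _ => hmono a' s t')
      (fun a' => gN a'.1 s t = 1) (fun a' a'' hle h => hle.1 s t h)
      t (List.mem_range.mpr ht) a hPa ?_
    intro a' hPa' _
    rw [hcell]
    show gN (cw (gN A s t ≠ 0) a'.1 s t) s t = 1
    rw [gN_cw_iff _ hPa'.1 hs ht]
    exact Or.inr ⟨by simpa [ae] using hA, rfl, rfl⟩
  · -- completeness for the negative matrix
    intro hB
    refine foldl_point (PSa n) leA leA_refl leA_trans _ _
      (fun a s' _ ha => foldl_pred (PSa n) _ _ (fun a' t' _ ha' => hPSc a' s' t' ha') a ha)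
      (fun a s' _ => foldl_chain leA leA_refl leA_trans _ _ (fun a' t' _ => hmono a' s' t') a)
      (fun a => gN a.2 s t = 1) (fun a a' hle h => hle.2 s t h)
      s (List.mem_range.mpr hs) _ hz ?_
    intro a hPa _
    refine foldl_point (PSa n) leA leA_refl leA_trans _ _
      (fun a' t' _ ha' => hPSc a' s t' ha') (fun a' t' _ => hmono a' s t')
      (fun a' => gN a'.2 s t = 1) (fun a' a'' hle h => hle.2 s t h)
      t (List.mem_range.mpr ht) a hPa ?_
    intro a' hPa' _
    rw [hcell]
    show gN (cw (gN B s t ≠ 0) a'.2 s t) s t = 1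
    rw [gN_cw_iff _ hPa'.2.1 hs ht]
    exact Or.inr ⟨by simpa [ae] using hB, rfl, rfl⟩

theorem initA_inv (A B : List (List Int)) (n : Nat) : InvA A B n 0 (initA A B n) := by
  obtain ⟨hPS, hch⟩ := initA_char A B n
  refine ⟨hPS, fun s t hs ht => ?_⟩
  refine ⟨?_, ?_⟩
  · rw [(hch s t hs ht).1, Wk_zero]; simp
  · rw [(hch s t hs ht).2, Wk_zero]; simp

-- indexed fold over List.range
theorem foldl_range_inv {α : Type} (P : Nat → α → Prop) (f : α → Nat → α) (n : Nat)
    (h : ∀ k a, k < n → P k a → P (k+1) (f a k)) (a : α) (ha : P 0 a) :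
    P n ((List.range n).foldl f a) := by
  have main : ∀ m, m ≤ n → P m ((List.range m).foldl f a) := by
    intro m
    induction m with
    | zero => intro _; simpa using ha
    | succ i ih =>
        intro hle
        rw [List.range_succ, List.foldl_append, List.foldl_cons, List.foldl_nil]
        exact h i _ (by omega) (ih (by omega))
  exact main n le_rfl

theorem runA_inv (A B : List (List Int)) (n : Nat) : InvA A B n n (runA A B n) := by
  unfold runA
  refine foldl_range_inv (InvA A B n) _ n (fun k a hk ha => ?_) _ (initA_inv A B n)
  rw [pyRange_two]
  exact pivot_step hk ha

-- ===== B-side: per-source rounds of the parity-doubled BFS =====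
def StB : Type := List Bool × List Bool

def stepB (A B : List (List Int)) (n : Nat) (pn : StB) : StB :=
  ((List.range n).map (fun v => pn.1.getD v false ||
      (List.range n).any (fun u => (pn.1.getD u false && ae A u v) || (pn.2.getD u false && ae B u v))),
   (List.range n).map (fun v => pn.2.getD v false ||
      (List.range n).any (fun u => (pn.2.getD u false && ae A u v) || (pn.1.getD u false && ae B u v))))

def initB (A B : List (List Int)) (n s : Nat) : StB :=
  ((List.range n).map (fun t => ae A s t), (List.range n).map (fun t => ae B s t))

def itB (A B : List (List Int)) (n s : Nat) (m : Nat) : StB :=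
  (stepB A B n)^[m] (initB A B n s)

def pB (pn : StB) (p : Bool) : List Bool := cond p pn.2 pn.1

def LenB (n : Nat) (pn : StB) : Prop := pn.1.length = n ∧ pn.2.length = n

def leB (pn pn' : StB) : Prop :=
  (∀ v, pn.1.getD v false = true → pn'.1.getD v false = true) ∧
  (∀ v, pn.2.getD v false = true → pn'.2.getD v false = true)

theorem leB_refl (pn : StB) : leB pn pn := ⟨fun _ h => h, fun _ h => h⟩

theorem leB_trans {a b c : StB} (h1 : leB a b) (h2 : leB b c) : leB a c :=
  ⟨fun v h => h2.1 v (h1.1 v h), fun v h => h2.2 v (h1.2 v h)⟩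

theorem getD_lt_of_true {l : List Bool} {v : Nat} (h : l.getD v false = true) : v < l.length := by
  by_contra hv
  rw [List.getD_eq_default _ _ (Nat.le_of_not_lt hv)] at h
  exact Bool.false_ne_true h

theorem lenB_initB (A B : List (List Int)) (n s : Nat) : LenB n (initB A B n s) := by
  constructor <;> simp [initB]

theorem lenB_stepB (A B : List (List Int)) (n : Nat) (pn : StB) : LenB n (stepB A B n pn) := by
  constructor <;> simp [stepB]

theorem lenB_itB (A B : List (List Int)) (n s m : Nat) : LenB n (itB A B n s m) := by
  cases m with
  | zero => exact lenB_initB A B n s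
  | succ m =>
      rw [itB, Function.iterate_succ_apply']
      exact lenB_stepB A B n _

theorem itB_succ (A B : List (List Int)) (n s m : Nat) :
    itB A B n s (m+1) = stepB A B n (itB A B n s m) := by
  rw [itB, itB, Function.iterate_succ_apply']

theorem leB_stepB {A B : List (List Int)} {n : Nat} {pn : StB} (hL : LenB n pn) :
    leB pn (stepB A B n pn) := by
  refine ⟨fun v h => ?_, fun v h => ?_⟩
  · have hv : v < n := hL.1 ▸ getD_lt_of_true h
    show (List.map _ (List.range n)).getD v false = true
    rw [PySem.List.getD_map_range _ n v false hv, h]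
    simp
  · have hv : v < n := hL.2 ▸ getD_lt_of_true h
    show (List.map _ (List.range n)).getD v false = true
    rw [PySem.List.getD_map_range _ n v false hv, h]
    simp

theorem leB_itB_le (A B : List (List Int)) (n s : Nat) {m m' : Nat} (h : m ≤ m') :
    leB (itB A B n s m) (itB A B n s m') := by
  induction m' with
  | zero => rw [Nat.le_zero.mp h]; exact leB_refl _
  | succ j ih =>
      rcases Nat.le_succ_iff.mp h with hj | rfl
      · refine leB_trans (ih hj) ?_
        rw [itB_succ]
        exact leB_stepB (lenB_itB A B n s j)
      · exact leB_refl _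
-- counting true entries: pointwise growth is strict on a changed list
theorem countP_mono_getD : ∀ (xs ys : List Bool), xs.length = ys.length →
    (∀ i, xs.getD i false = true → ys.getD i false = true) →
    xs.countP id ≤ ys.countP id := by
  intro xs
  induction xs with
  | nil => intro ys _ _; simp
  | cons x xs ih =>
      intro ys hlen himp
      cases ys with
      | nil => simp at hlen
      | cons y ys =>
          have htail : xs.countP id ≤ ys.countP id := by
            refine ih ys (by simpa using hlen) (fun i hi => ?_)
            have := himp (i+1) (by simpa [List.getD] using hi)
            simpa [List.getD] using this
          have hhead : x = true → y = true := fun hx => by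
            have := himp 0 (by simpa [List.getD] using hx)
            simpa [List.getD] using this
          cases x <;> cases y
          · simpa [List.countP_cons] using htail
          · simp [List.countP_cons]
            omega
          · exact absurd (hhead rfl) (by simp)
          · simp [List.countP_cons]
            omega

theorem countP_strict_getD : ∀ (xs ys : List Bool), xs.length = ys.length →
    (∀ i, xs.getD i false = true → ys.getD i false = true) →
    xs ≠ ys → xs.countP id < ys.countP id := by
  intro xs
  induction xs with
  | nil =>
      intro ys hlen _ hne
      cases ys with
      | nil => exact absurd rfl hne
      | cons y ys => simp at hlen
  | cons x xs ih =>
      intro ys hlen himp hne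
      cases ys with
      | nil => simp at hlen
      | cons y ys =>
          have hlen' : xs.length = ys.length := by simpa using hlen
          have himp' : ∀ i, xs.getD i false = true → ys.getD i false = true := fun i hi => by
            have := himp (i+1) (by simpa [List.getD] using hi)
            simpa [List.getD] using this
          have hhead : x = true → y = true := fun hx => by
            have := himp 0 (by simpa [List.getD] using hx)
            simpa [List.getD] using this
          have htail_le : xs.countP id ≤ ys.countP id := countP_mono_getD xs ys hlen' himp'
          by_cases hxy : x = y
          · subst hxy
            have hne' : xs ≠ ys := fun h => hne (by rw [h])
            have := ih ys hlen' himp' hne'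
            cases x <;> simp [List.countP_cons] <;> omega
          · cases x <;> cases y
            · exact absurd rfl hxy
            · simp [List.countP_cons]
              omega
            · exact absurd (hhead rfl) (by simp)
            · exact absurd rfl hxy

def cntB (pn : StB) : Nat := pn.1.countP id + pn.2.countP id

theorem cntB_strict {n : Nat} {pn pn' : StB} (hL : LenB n pn) (hL' : LenB n pn')
    (hle : leB pn pn') (hne : pn ≠ pn') : cntB pn < cntB pn' := by
  have h1 := countP_mono_getD pn.1 pn'.1 (by rw [hL.1, hL'.1]) hle.1
  have h2 := countP_mono_getD pn.2 pn'.2 (by rw [hL.2, hL'.2]) hle.2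
  by_cases hfst : pn.1 = pn'.1
  · have := countP_strict_getD pn.2 pn'.2 (by rw [hL.2, hL'.2]) hle.2
      (fun h2 => hne (Prod.ext hfst h2))
    unfold cntB; omega
  · have := countP_strict_getD pn.1 pn'.1 (by rw [hL.1, hL'.1]) hle.1 hfst
    unfold cntB; omega

theorem cntB_le {n : Nat} {pn : StB} (hL : LenB n pn) : cntB pn ≤ 2 * n := by
  obtain ⟨e1, e2⟩ := hL
  have h1 := List.countP_le_length (p := id) (l := pn.1)
  have h2 := List.countP_le_length (p := id) (l := pn.2)
  unfold cntB; omega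

theorem itB_stable (A B : List (List Int)) (n s m : Nat)
    (h : itB A B n s m = itB A B n s (m+1)) :
    ∀ j, m ≤ j → itB A B n s j = itB A B n s m := by
  intro j hj
  induction j with
  | zero => rw [Nat.le_zero.mp hj]
  | succ i ih =>
      rcases Nat.le_succ_iff.mp hj with hi | rfl
      · rw [itB_succ, ih hi, ← itB_succ, ← h]
      · rfl

theorem itB_fix (A B : List (List Int)) (n s : Nat) :
    stepB A B n (itB A B n s (2*n)) = itB A B n s (2*n) := by
  by_contra hne
  have hne' : itB A B n s (2*n+1) ≠ itB A B n s (2*n) := by rw [itB_succ]; exact hne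
  have strict : ∀ m, m ≤ 2*n → itB A B n s m ≠ itB A B n s (m+1) := by
    intro m hm heq
    have hst := itB_stable A B n s m heq
    exact hne' (by rw [hst (2*n+1) (by omega), hst (2*n) hm])
  have grow : ∀ m, m ≤ 2*n+1 → m ≤ cntB (itB A B n s m) := by
    intro m
    induction m with
    | zero => intro _; exact Nat.zero_le _
    | succ i ih =>
        intro hi
        have hlt : cntB (itB A B n s i) < cntB (itB A B n s (i+1)) :=
          cntB_strict (lenB_itB A B n s i) (lenB_itB A B n s (i+1))
            (leB_itB_le A B n s (Nat.le_succ i)) (strict i (by omega))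
        have := ih (by omega)
        omega
  have h1 := grow (2*n+1) le_rfl
  have h2 := cntB_le (lenB_itB A B n s (2*n+1))
  omega

-- soundness: every marked state is reachable by a walk of length ≥ 1 from (s, 0)
def SoundB (A B : List (List Int)) (n s : Nat) (pn : StB) : Prop :=
  ∀ v q, (pB pn q).getD v false = true → Wk A B n s v q

theorem soundB_initB (A B : List (List Int)) (n s : Nat) : SoundB A B n s (initB A B n s) := by
  intro v q hv
  have hvn : v < n := by
    have := getD_lt_of_true hv
    cases q <;> simpa [pB, initB] using this
  cases q
  · refine Wk.sa ?_
    simp only [pB, Bool.cond_false, initB] at hv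
    rwa [PySem.List.getD_map_range _ n v false hvn] at hv
  · refine Wk.sb ?_
    simp only [pB, Bool.cond_true, initB] at hv
    rwa [PySem.List.getD_map_range _ n v false hvn] at hv

theorem soundB_stepB {A B : List (List Int)} {n s : Nat} {pn : StB}
    (h : SoundB A B n s pn) : SoundB A B n s (stepB A B n pn) := by
  intro v q hv
  have hvn : v < n := by
    have := getD_lt_of_true hv
    cases q <;> simpa [pB, stepB] using this
  cases q
  · simp only [pB, Bool.cond_false, Bool.cond_true, stepB,
      PySem.List.getD_map_range _ n v false hvn] at hv
    rcases Bool.or_eq_true_iff.mp hv with h0 | h0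
    · exact h v false (by simpa [pB] using h0)
    · obtain ⟨u, hu, hval⟩ := List.any_eq_true.mp h0
      have hun : u < n := List.mem_range.mp hu
      rcases Bool.or_eq_true_iff.mp hval with hc | hc <;> rw [Bool.and_eq_true] at hc
      · simpa using Wk_trans (h u false (by simpa [pB] using hc.1)) hun (Wk.sa hc.2)
      · simpa using Wk_trans (h u true (by simpa [pB] using hc.1)) hun (Wk.sb hc.2)
  · simp only [pB, Bool.cond_true, stepB, PySem.List.getD_map_range _ n v false hvn] at hv
    rcases Bool.or_eq_true_iff.mp hv with h0 | h0
    · exact h v true (by simpa [pB] using h0)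
    · obtain ⟨u, hu, hval⟩ := List.any_eq_true.mp h0
      have hun : u < n := List.mem_range.mp hu
      rcases Bool.or_eq_true_iff.mp hval with hc | hc <;> rw [Bool.and_eq_true] at hc
      · simpa using Wk_trans (h u true (by simpa [pB] using hc.1)) hun (Wk.sa hc.2)
      · simpa using Wk_trans (h u false (by simpa [pB] using hc.1)) hun (Wk.sb hc.2)

theorem soundB_itB (A B : List (List Int)) (n s m : Nat) : SoundB A B n s (itB A B n s m) := by
  induction m with
  | zero => exact soundB_initB A B n s
  | succ i ih => rw [itB_succ]; exact soundB_stepB ih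

-- a fixed point of the round operator is closed under following one edge
theorem closedB {A B : List (List Int)} {n : Nat} {pn : StB}
    (hfix : stepB A B n pn = pn) {u v : Nat} (hu : u < n) (hv : v < n) (p e : Bool)
    (hm : (pB pn p).getD u false = true)
    (he : (if e then ae B u v else ae A u v) = true) :
    (pB pn (p ^^ e)).getD v false = true := by
  have hval : (pB (stepB A B n pn) (p ^^ e)).getD v false = true := by
    cases p <;> cases e <;>
    · simp only [pB, Bool.xor_false, Bool.xor_true, Bool.not_false, Bool.not_true,
        Bool.cond_true, Bool.cond_false, stepB]
      rw [PySem.List.getD_map_range _ n v false hv]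
      refine Bool.or_eq_true_iff.mpr (Or.inr (List.any_eq_true.mpr
        ⟨u, List.mem_range.mpr hu, ?_⟩))
      simp only [pB, Bool.cond_true, Bool.cond_false] at hm
      simp_all
  rwa [hfix] at hval

-- transfer a marked start vertex along any walk inside a fixed point
theorem walkB {A B : List (List Int)} {n : Nat} {pn : StB}
    (hfix : stepB A B n pn = pn) :
    ∀ {u v : Nat} {q : Bool}, Wk A B n u v q → u < n → v < n →
      ∀ p, (pB pn p).getD u false = true → (pB pn (p ^^ q)).getD v false = true := by
  intro u v q w
  induction w with
  | @sa u v h =>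
      intro hu hv p hp
      simpa using closedB hfix hu hv p false hp (by simpa using h)
  | @sb u v h =>
      intro hu hv p hp
      exact closedB hfix hu hv p true hp (by simpa using h)
  | @ca u m v q h hm w ih =>
      intro hu hv p hp
      have hmark : (pB pn p).getD m false = true := by
        simpa using closedB hfix hu hm p false hp (by simpa using h)
      exact ih hm hv p hmark
  | @cb u m v q h hm w ih =>
      intro hu hv p hp
      have hmark : (pB pn (p ^^ true)).getD m false = true :=
        closedB hfix hu hm p true hp (by simpa using h)
      have := ih hm hv (p ^^ true) hmark
      have hxor : ((p ^^ true) ^^ q) = (p ^^ !q) := by cases p <;> cases q <;> rfl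
      rwa [hxor] at this

-- completeness: every walk from (s, 0) ends in a marked state of the 2n-round iterate
theorem completeB {A B : List (List Int)} {n s : Nat} (hs : s < n) :
    ∀ {t : Nat} {q : Bool}, t < n → Wk A B n s t q →
      (pB (itB A B n s (2*n)) q).getD t false = true := by
  have hfix := itB_fix A B n s
  have hle : leB (itB A B n s 0) (itB A B n s (2*n)) := leB_itB_le A B n s (Nat.zero_le _)
  have hinit : ∀ (m : Nat) (e : Bool), m < n → (if e then ae B s m else ae A s m) = true →
      (pB (itB A B n s (2*n)) e).getD m false = true := by
    intro m e hm he
    have h0 : (pB (itB A B n s 0) e).getD m false = true := by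
      cases e <;>
      · simp only [pB, Bool.cond_true, Bool.cond_false, itB, Function.iterate_zero_apply, initB]
        rw [PySem.List.getD_map_range _ n m false hm]
        simpa using he
    cases e
    · exact hle.1 m (by simpa [pB] using h0)
    · exact hle.2 m (by simpa [pB] using h0)
  intro t q ht w
  cases w with
  | sa h => simpa using hinit t false ht (by simpa using h)
  | sb h => exact hinit t true ht (by simpa using h)
  | @ca _ m _ q h hm w =>
      have hmark := hinit m false hm (by simpa using h)
      simpa using walkB hfix w hm ht false hmark
  | @cb _ m _ q h hm w =>
      have hmark := hinit m true hm (by simpa using h)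
      simpa using walkB hfix w hm ht true hmark

-- bridging: the ports equal their proof-side restatements
theorem foldl_const {α : Type} (g : α → α) (m : Nat) (x : α) :
    (List.range m).foldl (fun a _ => g a) x = g^[m] x := by
  induction m with
  | zero => rfl
  | succ i ih =>
      rw [List.range_succ, List.foldl_append, List.foldl_cons, List.foldl_nil,
        Function.iterate_succ_apply', ih]

theorem portB_eq (A B : List (List Int)) : NegWalk_Existence_alt A B =
    (List.range A.length).map
      (fun s => (itB A B A.length s (2*A.length)).2.map (fun x => if x then (1:Int) else 0)) := by
  simp only [NegWalk_Existence_alt]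
  rw [PySem.List.foldl_append_singleton_eq_map]
  simp only [foldl_const, itB, stepB, initB, List.nil_append]
  rfl

-- ===== VERDICT (by name: the statement is the Claim_ definition above) =====
theorem NegWalk_Existence_spec : Claim_equal_NegWalk_Existence := by
  intro A B _ _
  unfold Spec_NegWalk_Existence
  rw [portA_eq, portB_eq]
  obtain ⟨⟨hS1, hS2, z1, z2⟩, hIff⟩ := runA_inv A B A.length
  apply List.ext_getElem
  · rw [hS2.1]; simp
  · intro s hs1 hs2
    have hsn : s < A.length := by rwa [hS2.1] at hs1
    apply List.ext_getElem
    · rw [hS2.2 _ (List.getElem_mem hs1), List.getElem_map, List.getElem_range]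
      simp [(lenB_itB A B A.length s (2*A.length)).2]
    · intro t ht1 ht2
      have htn : t < A.length := by
        rwa [hS2.2 _ (List.getElem_mem hs1)] at ht1
      have hLHS : (runA A B A.length).2[s][t] = gN (runA A B A.length).2 s t := by
        unfold gN
        rw [List.getD_eq_getElem _ [] (by omega : s < (runA A B A.length).2.length),
          List.getD_eq_getElem _ 0 (by omega : t < (runA A B A.length).2[s].length)]
      have hmark : ((itB A B A.length s (2*A.length)).2.getD t false = true) ↔
          Wk A B A.length s t true := by
        constructor
        · intro h
          exact soundB_itB A B A.length s (2*A.length) t true h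
        · intro h
          exact completeB hsn htn h
      rw [hLHS]
      simp only [List.getElem_map, List.getElem_range]
      rw [← List.getD_eq_getElem (itB A B A.length s (2*A.length)).2 false]
      by_cases hw : Wk A B A.length s t true
      · rw [(hIff s t hsn htn).2.mpr hw, hmark.mpr hw]
        simp
      · have h0 : gN (runA A B A.length).2 s t = 0 := by
          rcases z2 s t with h | h
          · exact h
          · exact absurd ((hIff s t hsn htn).2.mp h) hw
        have hb : (itB A B A.length s (2*A.length)).2.getD t false = false := by
          cases hcase : (itB A B A.length s (2*A.length)).2.getD t false
          · rfl
          · exact absurd (hmark.mp hcase) hw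
        rw [h0, hb]
        simp
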